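-- pv_equiv track=rewrite | github.com/sakettamrakar/TraderFund | automation/planner/memory_diff.py | _extract_sections_from_content
-- ===== SOURCE A (Python) =====
-- from typing import Any, Dict, List, Optional
--
-- def _extract_sections_from_content(content: str) -> List[tuple]:
--     """Extract (section_name, section_summary) pairs from markdown content."""
--     sections = []
--     lines = content.splitlines()
--     current_section = None
--     current_lines = []
--
--     for line in lines:
--         stripped = line.strip()
--         if stripped.startswith("#"):
--             # Save previous section
--             if current_section and current_lines:
--                 summary = "\n".join(l for l in current_lines if l.strip())[:500]
--                 if summary:
--                     sections.append((current_section, summary))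
--             current_section = stripped.lstrip("#").strip()
--             current_lines = []
--         elif current_section:
--             current_lines.append(stripped)
--
--     # Final section
--     if current_section and current_lines:
--         summary = "\n".join(l for l in current_lines if l.strip())[:500]
--         if summary:
--             sections.append((current_section, summary))
--
--     return sections
-- ===== SOURCE B (Python) =====
-- from typing import List
--
--
-- def _group(lines):
--     """First pass: split the lines into (header_name, [stripped body lines]) groups."""
--     groups = []
--     i = 0
--     n = len(lines)
--     while i < n:
--         s = lines[i].strip()
--         i += 1
--         if s.startswith("#"):
--             name = s.lstrip("#").strip()
--             body = []
--             while i < n and not lines[i].strip().startswith("#"):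
--                 body.append(lines[i].strip())
--                 i += 1
--             groups.append((name, body))
--     return groups
--
--
-- def _extract_sections_from_content(content: str) -> List[tuple]:
--     """Extract (section_name, section_summary) pairs from markdown content."""
--     result = []
--     for name, block in _group(content.splitlines()):
--         summary = "\n".join(l for l in block if l.strip())[:500]
--         if name and summary:
--             result.append((name, summary))
--     return result
-- ===== Notes on version B (the rewrite author's own statement) =====
-- stated objective: alternative
-- what changed: Replaces A's single stateful scan (current_section/current_lines with inline flushing at each header and a trailing final-flush) by a two-phase pipeline: a grouping pass that cuts the lines into (header, body-lines) groups, then a separate summarizing pass that joins, truncates and filters each group.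
import Mathlib
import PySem

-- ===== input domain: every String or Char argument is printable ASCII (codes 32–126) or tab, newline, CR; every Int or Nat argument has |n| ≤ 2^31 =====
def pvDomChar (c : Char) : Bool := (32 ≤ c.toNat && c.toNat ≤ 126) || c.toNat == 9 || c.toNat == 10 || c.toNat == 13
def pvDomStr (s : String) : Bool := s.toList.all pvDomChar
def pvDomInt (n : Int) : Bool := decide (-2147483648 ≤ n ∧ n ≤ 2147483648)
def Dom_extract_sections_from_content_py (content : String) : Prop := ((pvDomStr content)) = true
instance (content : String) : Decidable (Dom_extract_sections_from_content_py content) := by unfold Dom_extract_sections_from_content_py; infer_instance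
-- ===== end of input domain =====

-- B replaces A's single stateful scan (inline flush at each header + final flush) by a
-- grouping pass followed by a separate summarizing pass; alternative decomposition, same cost.

-- ===== PORT A =====
-- s.lstrip("#") ported by hand (exact: drops exactly the leading '#' characters)
def pvLstripHash (l : List Char) : List Char := l.dropWhile (fun c => c == '#')

-- "\n".join(l for l in cl if l.strip())[:500]
def pvSummary (cl : List (List Char)) : List Char :=
  PySem.List.slice
    (PySem.Chars.join ['\n'] (cl.filter (fun l => !(PySem.Chars.strip l).isEmpty)))
    none (some 500)

-- A's "save previous section" block: if current_section and current_lines: … append …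
def pvFlush (sections : List (String × String)) (cs : Option (List Char))
    (cl : List (List Char)) : List (String × String) :=
  match cs with
  | some name =>
    if !name.isEmpty && !cl.isEmpty then
      if !(pvSummary cl).isEmpty then
        sections ++ [(String.ofList name, String.ofList (pvSummary cl))]
      else sections
    else sections
  | none => sections

-- A's loop body
def pvStepA (st : List (String × String) × Option (List Char) × List (List Char))
    (line : List Char) :
    List (String × String) × Option (List Char) × List (List Char) :=
  let s := PySem.Chars.strip line
  if PySem.Chars.startswith s ['#'] then
    (pvFlush st.1 st.2.1 st.2.2, some (PySem.Chars.strip (pvLstripHash s)), [])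
  else
    match st.2.1 with
    | some name => if !name.isEmpty then (st.1, some name, st.2.2 ++ [s]) else st
    | none => st

def extract_sections_from_content_py (content : String) : List (String × String) :=
  let st := (PySem.Chars.splitlines content.toList).foldl pvStepA ([], none, [])
  pvFlush st.1 st.2.1 st.2.2

-- ===== PORT B =====
-- inner while loop of _group: collect stripped body lines up to the next header
def pvTakeBody : List (List Char) → List (List Char) × List (List Char)
  | [] => ([], [])
  | line :: rest =>
    if PySem.Chars.startswith (PySem.Chars.strip line) ['#'] then ([], line :: rest)
    else ((PySem.Chars.strip line) :: (pvTakeBody rest).1, (pvTakeBody rest).2)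

lemma pvTakeBody_len : ∀ (ls : List (List Char)), (pvTakeBody ls).2.length ≤ ls.length
  | [] => Nat.le_refl _
  | line :: rest => by
    simp only [pvTakeBody]
    split
    · exact Nat.le_refl _
    · exact Nat.le_trans (pvTakeBody_len rest) (Nat.le_succ _)

-- outer while loop of _group
def pvGroup : List (List Char) → List (List Char × List (List Char))
  | [] => []
  | line :: rest =>
    let s := PySem.Chars.strip line
    if PySem.Chars.startswith s ['#'] then
      (PySem.Chars.strip (pvLstripHash s), (pvTakeBody rest).1) ::
        pvGroup (pvTakeBody rest).2
    else pvGroup rest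
termination_by ls => ls.length
decreasing_by
  · exact Nat.lt_succ_of_le (pvTakeBody_len rest)
  · exact Nat.lt_succ_of_le (Nat.le_refl _)

-- B's second pass on one group: name and summary must both be truthy
def pvProcOne (name : List Char) (block : List (List Char)) : Option (String × String) :=
  if !name.isEmpty && !(pvSummary block).isEmpty then
    some (String.ofList name, String.ofList (pvSummary block))
  else none

def extract_sections_from_content_py_alt (content : String) : List (String × String) :=
  (pvGroup (PySem.Chars.splitlines content.toList)).filterMap (fun g => pvProcOne g.1 g.2)

-- ===== PRECONDITION & SPEC =====
def Spec_extract_sections_from_content_py (content : String) (out : List (String × String)) : Prop := out = extract_sections_from_content_py_alt content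
instance (content : String) (out : List (String × String)) : Decidable (Spec_extract_sections_from_content_py content out) := by unfold Spec_extract_sections_from_content_py; infer_instance

-- ===== CLAIM (what is proved, stated in full; the proofs are below) =====
def Claim_equal_extract_sections_from_content_py : Prop := ∀ (content : String), Dom_extract_sections_from_content_py content → Spec_extract_sections_from_content_py content (extract_sections_from_content_py content)

-- ===== LEMMAS AND PROOFS =====

lemma pvSummary_nil : pvSummary [] = [] := by decide

-- A's flush of an open section equals B's per-group processing of that group
lemma pvFlush_eq (secs : List (String × String)) (name : List Char) (cl : List (List Char)) :
    pvFlush secs (some name) cl = secs ++ (pvProcOne name cl).toList := by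
  cases cl with
  | nil => simp [pvFlush, pvProcOne, pvSummary_nil]
  | cons x xs =>
    simp only [pvFlush, pvProcOne, List.isEmpty_cons, Bool.not_false, Bool.and_true]
    by_cases hn : name.isEmpty
    · simp [hn]
    · simp only [hn, Bool.not_false, Bool.true_and]
      by_cases hs : (pvSummary (x :: xs)).isEmpty <;> simp [hs]

lemma pvProcOne_nil_name (b : List (List Char)) : pvProcOne [] b = none := by
  simp [pvProcOne]

-- main loop invariant: finishing A's fold from any state equals secs ++ B's processing of the
-- remaining groups (with the open section, if any, completed by the lines up to the next header)
lemma pvInv : ∀ (lines : List (List Char)) (secs : List (String × String))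
    (cs : Option (List Char)) (cl : List (List Char)),
    pvFlush (lines.foldl pvStepA (secs, cs, cl)).1
            (lines.foldl pvStepA (secs, cs, cl)).2.1
            (lines.foldl pvStepA (secs, cs, cl)).2.2 =
    secs ++ (match cs with
      | none => (pvGroup lines).filterMap (fun g => pvProcOne g.1 g.2)
      | some name =>
          ((name, cl ++ (pvTakeBody lines).1) :: pvGroup (pvTakeBody lines).2).filterMap
            (fun g => pvProcOne g.1 g.2))
  | [], secs, cs, cl => by
    cases cs with
    | none => simp [pvFlush, pvGroup]
    | some name =>
      simp only [List.foldl_nil, pvFlush_eq, pvTakeBody, pvGroup, List.append_nil,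
        List.filterMap_cons, List.filterMap_nil]
      cases pvProcOne name cl <;> simp
  | line :: rest, secs, cs, cl => by
    by_cases hH : PySem.Chars.startswith (PySem.Chars.strip line) ['#']
    · -- header line
      have hstep : pvStepA (secs, cs, cl) line =
          (pvFlush secs cs cl, some (PySem.Chars.strip (pvLstripHash (PySem.Chars.strip line))), []) := by
        simp [pvStepA, hH]
      cases cs with
      | none =>
        simp only [List.foldl_cons, hstep, pvInv rest]
        simp [pvGroup, hH, pvFlush]
      | some name =>
        simp only [List.foldl_cons, hstep, pvInv rest]
        simp only [pvGroup, pvTakeBody, hH, pvFlush_eq, if_true, List.append_nil,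
          List.filterMap_cons, List.append_assoc]
        cases pvProcOne name cl <;> simp
    · -- non-header line
      cases cs with
      | none =>
        have hstep : pvStepA (secs, none, cl) line = (secs, none, cl) := by
          simp [pvStepA, hH]
        simp only [List.foldl_cons, hstep, pvInv rest]
        simp [pvGroup, hH]
      | some name =>
        by_cases hn : name.isEmpty
        · have hname : name = [] := List.isEmpty_iff.mp hn
          have hstep : pvStepA (secs, some name, cl) line = (secs, some name, cl) := by
            simp [pvStepA, hH, hn]
          simp only [List.foldl_cons, hstep, pvInv rest]
          simp [pvTakeBody, hH, hname, pvProcOne_nil_name]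
        · have hstep : pvStepA (secs, some name, cl) line =
              (secs, some name, cl ++ [PySem.Chars.strip line]) := by
            simp [pvStepA, hH, hn]
          simp only [List.foldl_cons, hstep, pvInv rest]
          simp [pvTakeBody, hH]

-- ===== VERDICT (by name: the statement is the Claim_ definition above) =====
theorem extract_sections_from_content_py_spec : Claim_equal_extract_sections_from_content_py := by
  intro content _
  unfold Spec_extract_sections_from_content_py extract_sections_from_content_py
    extract_sections_from_content_py_alt
  simpa using pvInv (PySem.Chars.splitlines content.toList) [] none []
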